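-- pv_equiv track=rewrite | github.com/JulienLeprince/hierarchicallearning | src/hl/utils.py | generate_node_keys
-- ===== SOURCE A (Python) =====
-- def generate_node_keys(n_samples, node_key_ensemble=[]):
--     ascii_uppercase = 'ABCDEFGHIJKLMNOPQRSTUVWXYZ'
--
--     if len(ascii_uppercase) >= n_samples or len(node_key_ensemble) == 0:
--         node_key_ensemble = [key for key in ascii_uppercase[0:n_samples]]
--     else:
--         node_key_ensemble = [key1 + key2 for key1 in ascii_uppercase for key2 in node_key_ensemble]
--
--     if len(node_key_ensemble) < n_samples:
--         node_key_ensemble = generate_node_keys(n_samples, node_key_ensemble)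
--
--     # cut out extra values
--     node_key_ensemble = node_key_ensemble[0:n_samples]
--     return node_key_ensemble
-- ===== SOURCE B (Python) =====
-- def generate_node_keys(n_samples, node_key_ensemble=[]):
--     ascii_uppercase = 'ABCDEFGHIJKLMNOPQRSTUVWXYZ'
--
--     if len(ascii_uppercase) >= n_samples or len(node_key_ensemble) == 0:
--         ens = [key for key in ascii_uppercase[0:n_samples]]
--     else:
--         ens = [k1 + k2 for k1 in ascii_uppercase for k2 in node_key_ensemble]
--
--     while len(ens) < n_samples:
--         ens = [k1 + k2 for k1 in ascii_uppercase for k2 in ens]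
--
--     return ens[0:n_samples]
-- ===== Notes on version B (the rewrite author's own statement) =====
-- stated objective: simpler
-- what changed: A's conditional recursive call (which re-slices and re-checks the seeding branch at every recursion level) is replaced by an explicit while loop that keeps multiplying the ensemble by the 26 letters, with a single final slice.
import Mathlib
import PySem

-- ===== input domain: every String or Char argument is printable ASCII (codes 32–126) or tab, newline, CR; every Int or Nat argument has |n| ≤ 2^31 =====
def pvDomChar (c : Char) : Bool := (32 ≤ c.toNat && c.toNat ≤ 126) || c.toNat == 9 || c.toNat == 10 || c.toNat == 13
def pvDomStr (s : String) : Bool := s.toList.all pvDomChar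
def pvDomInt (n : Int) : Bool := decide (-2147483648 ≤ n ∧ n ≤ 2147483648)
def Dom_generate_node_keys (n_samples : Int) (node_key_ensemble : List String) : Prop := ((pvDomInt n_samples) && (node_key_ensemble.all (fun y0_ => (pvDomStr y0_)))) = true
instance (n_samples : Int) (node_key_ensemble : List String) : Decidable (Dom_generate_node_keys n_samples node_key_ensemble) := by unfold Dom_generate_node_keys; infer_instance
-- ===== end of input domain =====

-- B replaces A's conditional recursive call by an explicit while loop and a single final slice
-- (objective: simpler — same seeding branch, iteration instead of recursion).

-- ===== PORT A =====
-- ascii_uppercase = 'ABCDEFGHIJKLMNOPQRSTUVWXYZ' (as its character list)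
def pvAsciiA : List Char := "ABCDEFGHIJKLMNOPQRSTUVWXYZ".toList

-- the first if/else of A's body: the reassigned node_key_ensemble
-- (the branch condition is A's own `len(ascii_uppercase) >= n_samples or len(node_key_ensemble) == 0`)
def pvBranchA (n_samples : Int) (node_key_ensemble : List String) : List String :=
  if (pvAsciiA.length : Int) ≥ n_samples ∨ node_key_ensemble.length = 0 then
    (PySem.List.slice pvAsciiA (some 0) (some n_samples)).map (fun key => String.mk [key])
  else
    pvAsciiA.flatMap (fun key1 => node_key_ensemble.map (fun key2 => String.mk (key1 :: key2.toList)))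

theorem pvSliceTo {α : Type} (xs : List α) (n : Int) (hn : 0 ≤ n) :
    PySem.List.slice xs (some 0) (some n) = xs.take n.toNat := by
  rw [PySem.List.slice_zero_start]
  exact PySem.List.slice_to _ hn

-- cited by generate_node_keys' decreasing_by: when the recursive call fires, the ensemble grew
theorem pvBranchA_grow (n : Int) (e : List String) (h : ((pvBranchA n e).length : Int) < n) :
    e.length < (pvBranchA n e).length ∧ 26 ≤ (pvBranchA n e).length ∧ (pvBranchA n e).length < n.toNat := by
  have hn : 0 < n := by
    have := Int.natCast_nonneg (pvBranchA n e).length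
    omega
  by_cases hc : (pvAsciiA.length : Int) ≥ n ∨ e.length = 0
  · unfold pvBranchA at h ⊢
    rw [if_pos hc] at h ⊢
    rw [pvSliceTo _ _ (le_of_lt hn)] at h ⊢
    simp only [List.length_map, List.length_take] at h ⊢
    have hu : pvAsciiA.length = 26 := rfl
    rw [hu] at h ⊢
    rw [hu] at hc
    omega
  · unfold pvBranchA at h ⊢
    rw [if_neg hc] at h ⊢
    push_neg at hc
    have hu : pvAsciiA.length = 26 := rfl
    rw [List.length_flatMap] at h ⊢
    simp only [List.length_map] at h ⊢
    rw [List.map_const', List.sum_replicate, hu, smul_eq_mul] at h ⊢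
    omega

def generate_node_keys (n_samples : Int) (node_key_ensemble : List String) : List String :=
  PySem.List.slice
    (if h : ((pvBranchA n_samples node_key_ensemble).length : Int) < n_samples then
        generate_node_keys n_samples (pvBranchA n_samples node_key_ensemble)
      else pvBranchA n_samples node_key_ensemble)
    (some 0) (some n_samples)
termination_by n_samples.toNat - node_key_ensemble.length
decreasing_by
  obtain ⟨h1, _, h3⟩ := pvBranchA_grow n_samples node_key_ensemble h
  omega

-- ===== PORT B =====
def pvAsciiB : List Char := "ABCDEFGHIJKLMNOPQRSTUVWXYZ".toList

-- B's comprehension [k1 + k2 for k1 in ascii_uppercase for k2 in ens]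
def pvProdB (ens : List String) : List String :=
  pvAsciiB.flatMap (fun k1 => ens.map (fun k2 => String.mk (k1 :: k2.toList)))

-- cited by pvLoopB's decreasing_by
theorem pvProdB_len (ens : List String) : (pvProdB ens).length = 26 * ens.length := by
  unfold pvProdB
  rw [List.length_flatMap]
  simp only [List.length_map]
  rw [List.map_const', List.sum_replicate, smul_eq_mul]
  rfl

-- B's `while len(ens) < n_samples:` loop.  The `ens ≠ []` conjunct only makes the loop total in
-- Lean: inside generate_node_keys_alt the seed is empty only when n_samples ≤ 0, where the
-- Python while loop is not entered either.
def pvLoopB (n : Int) (ens : List String) : List String :=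
  if h : (ens.length : Int) < n ∧ ens ≠ [] then
    pvLoopB n (pvProdB ens)
  else ens
termination_by n.toNat - ens.length
decreasing_by
  obtain ⟨h1, h2⟩ := h
  have h4 : 0 < ens.length := by
    cases ens with
    | nil => exact absurd rfl h2
    | cons a t => simp
  rw [pvProdB_len]
  omega

def generate_node_keys_alt (n_samples : Int) (node_key_ensemble : List String) : List String :=
  PySem.List.slice
    (pvLoopB n_samples
      (if (pvAsciiB.length : Int) ≥ n_samples ∨ node_key_ensemble.length = 0 then
          (PySem.List.slice pvAsciiB (some 0) (some n_samples)).map (fun key => String.mk [key])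
        else
          pvProdB node_key_ensemble))
    (some 0) (some n_samples)

-- ===== PRECONDITION & SPEC =====
def Spec_generate_node_keys (n_samples : Int) (node_key_ensemble : List String) (out : List String) : Prop := out = generate_node_keys_alt n_samples node_key_ensemble
instance (n_samples : Int) (node_key_ensemble : List String) (out : List String) : Decidable (Spec_generate_node_keys n_samples node_key_ensemble out) := by unfold Spec_generate_node_keys; infer_instance

-- ===== CLAIM (what is proved, stated in full; the proofs are below) =====
def Claim_equal_generate_node_keys : Prop := ∀ (n_samples : Int) (node_key_ensemble : List String), Dom_generate_node_keys n_samples node_key_ensemble → Spec_generate_node_keys n_samples node_key_ensemble (generate_node_keys n_samples node_key_ensemble)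

-- ===== LEMMAS AND PROOFS =====

theorem pvSlice_idem (xs : List String) (n : Int) (hn : 0 ≤ n) :
    PySem.List.slice (PySem.List.slice xs (some 0) (some n)) (some 0) (some n)
      = PySem.List.slice xs (some 0) (some n) := by
  rw [pvSliceTo _ _ hn, pvSliceTo _ _ hn, List.take_take, min_self]

-- A's seeding branch equals B's seeding branch (they are the same Python line)
theorem pvBranch_eq (n : Int) (e : List String) :
    pvBranchA n e
      = if (pvAsciiB.length : Int) ≥ n ∨ e.length = 0 then
          (PySem.List.slice pvAsciiB (some 0) (some n)).map (fun key => String.mk [key])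
        else pvProdB e := rfl

-- A's recursion, entered at a state with 26 ≤ len e < n, computes the sliced fixed point of
-- B's loop from the same state.
theorem pvA_eq_loop : ∀ (k : Nat) (n : Int) (e : List String), n.toNat - e.length ≤ k →
    26 ≤ e.length → ((e.length : Int) < n) →
    generate_node_keys n e = PySem.List.slice (pvLoopB n e) (some 0) (some n) := by
  intro k
  induction k with
  | zero =>
    intro n e hk h26 hlt
    exfalso; omega
  | succ k ih =>
    intro n e hk h26 hlt
    have hn : 26 < n := by omega
    have hne : e ≠ [] := by
      intro h; subst h; simp at h26
    have hc : ¬((pvAsciiA.length : Int) ≥ n ∨ e.length = 0) := by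
      push_neg
      have hu : pvAsciiA.length = 26 := rfl
      rw [hu]
      exact ⟨hn, by omega⟩
    have hseed : pvBranchA n e = pvProdB e := by
      unfold pvBranchA; rw [if_neg hc]; rfl
    have hplen := pvProdB_len e
    have hcond : (e.length : Int) < n ∧ e ≠ [] := ⟨hlt, hne⟩
    rw [generate_node_keys, pvLoopB.eq_def, dif_pos hcond]
    simp only [hseed]
    by_cases hp : (((pvProdB e).length : Int) < n)
    · rw [dif_pos hp, ih n (pvProdB e) (by omega) (by omega) hp]
      exact pvSlice_idem _ _ (by omega)
    · rw [dif_neg hp, pvLoopB.eq_def, dif_neg (fun hcon => hp hcon.1)]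

-- ===== VERDICT (by name: the statement is the Claim_ definition above) =====
theorem generate_node_keys_spec : Claim_equal_generate_node_keys := by
  unfold Claim_equal_generate_node_keys Spec_generate_node_keys
  intro n e _
  have halt : generate_node_keys_alt n e
      = PySem.List.slice (pvLoopB n (pvBranchA n e)) (some 0) (some n) := by
    unfold generate_node_keys_alt
    rw [pvBranch_eq]
  rw [halt, generate_node_keys]
  split
  · rename_i h
    obtain ⟨h1, h2, h3⟩ := pvBranchA_grow n e h
    rw [pvA_eq_loop (n.toNat - (pvBranchA n e).length) n (pvBranchA n e) le_rfl h2 h]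
    exact pvSlice_idem _ _ (by omega)
  · rename_i h
    rw [pvLoopB.eq_def, dif_neg (fun hcon => h hcon.1)]
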